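-- pv_equiv track=rewrite | github.com/IuliaRadulescu/DynamicTextAnalysis | sortAuthorInteractionsByDays.py | createTimeIntervals
-- ===== SOURCE A (Python) =====
-- def createTimeIntervals(startTimestamp, endTimestamp, intervalInSeconds):
--
--     timeIntervals = []
--
--     current = startTimestamp
--
--     while (current < endTimestamp):
--
--         nextTimestamp = current + intervalInSeconds
--
--         timeIntervals.append(str(current) + '_' + str(nextTimestamp))
--
--         current = nextTimestamp
--
--     return timeIntervals
-- ===== SOURCE B (Python) =====
-- def createTimeIntervals(startTimestamp, endTimestamp, intervalInSeconds):
--     diff = endTimestamp - startTimestamp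
--     if diff <= 0:
--         return []
--     numIntervals = -(-diff // intervalInSeconds)  # ceiling division
--     return [str(startTimestamp + k * intervalInSeconds) + '_'
--             + str(startTimestamp + (k + 1) * intervalInSeconds)
--             for k in range(numIntervals)]
-- ===== Notes on version B (the rewrite author's own statement) =====
-- stated objective: alternative
-- what changed: B replaces A's while-loop accumulation by a closed form: it computes the number of intervals with one ceiling division and produces each interval string by index arithmetic (start + k*interval) over range(n).
import Mathlib
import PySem

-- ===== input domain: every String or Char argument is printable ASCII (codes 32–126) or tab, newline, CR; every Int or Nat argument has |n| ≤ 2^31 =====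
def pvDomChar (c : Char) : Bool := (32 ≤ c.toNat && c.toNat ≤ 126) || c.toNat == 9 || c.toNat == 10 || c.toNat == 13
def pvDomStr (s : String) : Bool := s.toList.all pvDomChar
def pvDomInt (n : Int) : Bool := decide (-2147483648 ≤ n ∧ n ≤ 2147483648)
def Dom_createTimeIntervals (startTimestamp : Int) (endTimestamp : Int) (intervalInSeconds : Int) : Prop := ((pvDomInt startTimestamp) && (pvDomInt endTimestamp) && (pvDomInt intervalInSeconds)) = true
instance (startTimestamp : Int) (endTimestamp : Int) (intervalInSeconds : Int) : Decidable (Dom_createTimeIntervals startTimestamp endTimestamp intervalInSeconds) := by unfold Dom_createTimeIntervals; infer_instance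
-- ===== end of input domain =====

-- B replaces A's while-loop accumulation by a closed form: one ceiling division counts the
-- intervals and each interval string is built by index arithmetic (objective: alternative).

-- ===== PORT A =====
-- A's while loop, fuel-bounded: fuel (endTimestamp - startTimestamp).toNat suffices whenever
-- the Python loop terminates (interval ≥ 1), since current then grows by ≥ 1 per iteration.
def pvLoopA (fuel : Nat) (current endTimestamp intervalInSeconds : Int) : List String :=
  match fuel with
  | 0 => []
  | f + 1 =>
    if current < endTimestamp then
      (PySem.Int.toStr current ++ "_" ++ PySem.Int.toStr (current + intervalInSeconds)) ::
        pvLoopA f (current + intervalInSeconds) endTimestamp intervalInSeconds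
    else []

def createTimeIntervals (startTimestamp : Int) (endTimestamp : Int) (intervalInSeconds : Int) : List String :=
  pvLoopA (endTimestamp - startTimestamp).toNat startTimestamp endTimestamp intervalInSeconds

-- ===== PORT B =====
def createTimeIntervals_alt (startTimestamp : Int) (endTimestamp : Int) (intervalInSeconds : Int) : List String :=
  let diff := endTimestamp - startTimestamp
  if diff ≤ 0 then []
  else
    let numIntervals := -(PySem.Int.floordiv (-diff) intervalInSeconds)  -- ceiling division
    (PySem.List.pyRange 0 numIntervals 1).map (fun k =>
      PySem.Int.toStr (startTimestamp + k * intervalInSeconds) ++ "_" ++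
      PySem.Int.toStr (startTimestamp + (k + 1) * intervalInSeconds))

-- ===== PRECONDITION & SPEC =====
-- Pre_ excludes exactly the inputs where A's while loop never terminates:
-- startTimestamp < endTimestamp with a non-positive interval.
def Pre_createTimeIntervals (startTimestamp : Int) (endTimestamp : Int) (intervalInSeconds : Int) : Prop :=
  startTimestamp < endTimestamp → 0 < intervalInSeconds
instance (startTimestamp : Int) (endTimestamp : Int) (intervalInSeconds : Int) : Decidable (Pre_createTimeIntervals startTimestamp endTimestamp intervalInSeconds) := by unfold Pre_createTimeIntervals; infer_instance

def pvWitness_createTimeIntervals : Int × Int × Int := (0, 10, 3)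

def Spec_createTimeIntervals (startTimestamp : Int) (endTimestamp : Int) (intervalInSeconds : Int) (out : List String) : Prop := out = createTimeIntervals_alt startTimestamp endTimestamp intervalInSeconds
instance (startTimestamp : Int) (endTimestamp : Int) (intervalInSeconds : Int) (out : List String) : Decidable (Spec_createTimeIntervals startTimestamp endTimestamp intervalInSeconds out) := by unfold Spec_createTimeIntervals; infer_instance

-- ===== CLAIM (what is proved, stated in full; the proofs are below) =====
def Claim_equal_createTimeIntervals : Prop := ∀ (startTimestamp : Int) (endTimestamp : Int) (intervalInSeconds : Int), Dom_createTimeIntervals startTimestamp endTimestamp intervalInSeconds → Pre_createTimeIntervals startTimestamp endTimestamp intervalInSeconds → Spec_createTimeIntervals startTimestamp endTimestamp intervalInSeconds (createTimeIntervals startTimestamp endTimestamp intervalInSeconds)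

-- ===== LEMMAS AND PROOFS =====

-- ceil((d - i)/i) = ceil(d/i) - 1 (as -((-d) // i)), for 0 < i
theorem pv_ceil_shift (d i : Int) (hi : 0 < i) :
    PySem.Int.floordiv (-(d - i)) i = PySem.Int.floordiv (-d) i + 1 := by
  have h := (PySem.Int.floordiv_eq_iff_of_pos (a := -d) (b := i)
    (q := PySem.Int.floordiv (-d) i) hi).mp rfl
  refine (PySem.Int.floordiv_eq_iff_of_pos hi).mpr ?_
  constructor <;> nlinarith [h.1, h.2]

-- ceil(d/i) ≥ 1 when d > 0, 0 < i
theorem pv_ceil_pos (d i : Int) (hd : 0 < d) (hi : 0 < i) :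
    1 ≤ -(PySem.Int.floordiv (-d) i) := by
  have h : PySem.Int.floordiv (-d) i < 0 := by
    rw [PySem.Int.floordiv_lt_iff_lt_mul hi]
    omega
  omega

-- ceil(d/i) ≤ 0 when d ≤ 0, 0 < i
theorem pv_ceil_nonpos (d i : Int) (hd : d ≤ 0) (hi : 0 < i) :
    -(PySem.Int.floordiv (-d) i) ≤ 0 := by
  have h : 0 ≤ PySem.Int.floordiv (-d) i := by
    have := (PySem.Int.le_floordiv_iff_mul_le (a := -d) (b := i) (q := 0) hi)
    omega
  omega

-- Main invariant: A's loop equals the indexed closed form, for sufficient fuel.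
theorem pvLoopA_closed (e i : Int) (hi : 0 < i) :
    ∀ (fuel : Nat) (current : Int), (e - current).toNat ≤ fuel →
      pvLoopA fuel current e i =
        (PySem.List.pyRange 0 (-(PySem.Int.floordiv (-(e - current)) i)) 1).map (fun k =>
          PySem.Int.toStr (current + k * i) ++ "_" ++ PySem.Int.toStr (current + (k + 1) * i)) := by
  intro fuel
  induction fuel with
  | zero =>
    intro current hf
    have hd : e - current ≤ 0 := by omega
    rw [PySem.List.pyRange_one_eq_nil (pv_ceil_nonpos _ _ hd hi)]
    simp [pvLoopA]
  | succ f ih =>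
    intro current hf
    by_cases h : current < e
    · have hd : 0 < e - current := by omega
      have hn := pv_ceil_pos _ _ hd hi
      rw [PySem.List.pyRange_one_cons (by omega)]
      have hrec := ih (current + i) (by omega)
      simp only [pvLoopA, if_pos h, List.map_cons]
      rw [List.cons_eq_cons]
      refine ⟨by rw [show current + 0 * i = current from by ring,
                     show current + (0 + 1) * i = current + i from by ring], ?_⟩
      rw [hrec]
      rw [show -(e - (current + i)) = -((e - current) - i) from by ring, pv_ceil_shift _ _ hi]
      rw [PySem.List.pyRange_one, PySem.List.pyRange_one]
      have hlen : (-PySem.Int.floordiv (-(e - current)) i - (0 + 1)).toNat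
          = (-(PySem.Int.floordiv (-(e - current)) i + 1) - 0).toNat := by omega
      rw [List.map_map, List.map_map, hlen]
      apply List.map_congr_left
      intro k _
      simp only [Function.comp_apply]
      rw [show current + (0 + 1 + (k : Int)) * i = current + i + (0 + (k : Int)) * i from by ring,
          show current + (0 + 1 + (k : Int) + 1) * i = current + i + (0 + (k : Int) + 1) * i from by ring]
    · have hd : e - current ≤ 0 := by omega
      rw [PySem.List.pyRange_one_eq_nil (pv_ceil_nonpos _ _ hd hi)]
      simp [pvLoopA, if_neg h]

-- ===== VERDICT (by name: the statement is the Claim_ definition above) =====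
theorem createTimeIntervals_spec : Claim_equal_createTimeIntervals := by
  intro s e i _ hpre
  unfold Spec_createTimeIntervals createTimeIntervals createTimeIntervals_alt
  by_cases hd : e - s ≤ 0
  · have : (e - s).toNat = 0 := by omega
    rw [this]
    simp [pvLoopA, hd]
  · have hi : 0 < i := hpre (by omega)
    rw [if_neg hd]
    exact pvLoopA_closed e i hi _ s (le_refl _)
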